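-- pv_equiv track=rewrite | github.com/O957/paleo-labels | assets/archive/smart_data.py | detect_label_type
-- ===== SOURCE A (Python) =====
-- def detect_label_type(fields: dict[str, str]) -> str:
--     """Under-the-hood schema detection based on field patterns."""
--     field_keys = {k.lower() for k in fields.keys()}
--
--     # Define type indicators
--     type_indicators = {
--         'Specimen': {'specimen_number', 'catalog_number', 'collection_date', 'collector'},
--         'Taxonomy': {'scientific_name', 'genus', 'species', 'family', 'order', 'class'},
--         'Locality': {'locality', 'country', 'state', 'county', 'coordinates', 'formation'},
--         'Collection': {'expedition', 'project', 'institution', 'collection'},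
--         'Locale': {'formation', 'age', 'geological_age', 'period', 'era'}
--     }
--
--     # Score each type based on field matches
--     type_scores = {}
--     for label_type, indicators in type_indicators.items():
--         score = len(field_keys.intersection(indicators))
--         if score > 0:
--             type_scores[label_type] = score
--
--     # Return the type with highest score, or 'General' as fallback
--     if type_scores:
--         return max(type_scores, key=type_scores.get)
--
--     return 'General'
-- ===== SOURCE B (Python) =====
-- def detect_label_type(fields: dict[str, str]) -> str:
--     """Schema detection via an inverted indicator index and a fixed-order max scan."""
--     order = ['Specimen', 'Taxonomy', 'Locality', 'Collection', 'Locale']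
--     index = {
--         'specimen_number': ['Specimen'], 'catalog_number': ['Specimen'],
--         'collection_date': ['Specimen'], 'collector': ['Specimen'],
--         'scientific_name': ['Taxonomy'], 'genus': ['Taxonomy'], 'species': ['Taxonomy'],
--         'family': ['Taxonomy'], 'order': ['Taxonomy'], 'class': ['Taxonomy'],
--         'locality': ['Locality'], 'country': ['Locality'], 'state': ['Locality'],
--         'county': ['Locality'], 'coordinates': ['Locality'],
--         'formation': ['Locality', 'Locale'],
--         'expedition': ['Collection'], 'project': ['Collection'],
--         'institution': ['Collection'], 'collection': ['Collection'],
--         'age': ['Locale'], 'geological_age': ['Locale'],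
--         'period': ['Locale'], 'era': ['Locale'],
--     }
--     counts = {t: 0 for t in order}
--     for key in {k.lower() for k in fields}:
--         for t in index.get(key, []):
--             counts[t] += 1
--     best, best_score = 'General', 0
--     for t in order:
--         if counts[t] > best_score:
--             best, best_score = t, counts[t]
--     return best
-- ===== Notes on version B (the rewrite author's own statement) =====
-- stated objective: idiomatic
-- what changed: Replaces A's per-type set-intersection scoring and dict-max selection by an inverted index mapping each indicator field to the types it votes for, one counting pass over the deduplicated lowercased keys, and a fixed-order first-max scan.
import Mathlib
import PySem

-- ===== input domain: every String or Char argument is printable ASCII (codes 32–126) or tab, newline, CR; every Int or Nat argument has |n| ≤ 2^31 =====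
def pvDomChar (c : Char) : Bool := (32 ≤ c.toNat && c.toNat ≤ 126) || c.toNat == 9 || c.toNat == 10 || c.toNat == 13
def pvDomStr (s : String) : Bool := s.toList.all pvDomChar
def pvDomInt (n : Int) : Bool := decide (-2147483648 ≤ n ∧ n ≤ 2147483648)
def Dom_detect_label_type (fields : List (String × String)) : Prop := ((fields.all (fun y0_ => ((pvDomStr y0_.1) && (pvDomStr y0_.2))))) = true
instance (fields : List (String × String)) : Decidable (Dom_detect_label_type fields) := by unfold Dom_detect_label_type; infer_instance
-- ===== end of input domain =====

-- B replaces A's per-type set intersections by an inverted indicator→types index with one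
-- counting pass over the (deduplicated, lowercased) field keys, then a fixed-order best scan
-- (objective: idiomatic/alternative; same asymptotic cost).

-- ===== PORT A =====
def detect_label_type (fields : List (String × String)) : String :=
  -- field_keys = {k.lower() for k in fields.keys()}
  let field_keys : PySem.Set String :=
    PySem.Set.ofList ((fields.map (·.1)).map PySem.Str.lower)
  -- type_indicators (dict of name → set literal; the set literals have no duplicates)
  let type_indicators : List (String × PySem.Set String) :=
    [("Specimen", PySem.Set.ofList ["specimen_number", "catalog_number", "collection_date", "collector"]),
     ("Taxonomy", PySem.Set.ofList ["scientific_name", "genus", "species", "family", "order", "class"]),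
     ("Locality", PySem.Set.ofList ["locality", "country", "state", "county", "coordinates", "formation"]),
     ("Collection", PySem.Set.ofList ["expedition", "project", "institution", "collection"]),
     ("Locale", PySem.Set.ofList ["formation", "age", "geological_age", "period", "era"])]
  -- for label_type, indicators in type_indicators.items(): score = len(field_keys & indicators); if score > 0: type_scores[label_type] = score
  let type_scores : PySem.Dict String Int :=
    type_indicators.foldl (fun d p =>
      let score : Int := PySem.Set.len (PySem.Set.inter field_keys p.2)
      if score > 0 then d.insert p.1 score else d) ⟨[]⟩
  -- if type_scores: return max(type_scores, key=type_scores.get)  (every key of type_scores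
  -- is present, so Python's .get returns its int value: getD _ 0; max keeps the FIRST maximum)
  if type_scores.size ≠ 0 then
    (PySem.List.max? type_scores.keys (fun k => type_scores.getD k 0)).getD "General"
  else "General"

-- ===== PORT B =====
def pvOrder : List String := ["Specimen", "Taxonomy", "Locality", "Collection", "Locale"]

def pvIndex : PySem.Dict String (List String) :=
  ⟨[("specimen_number", ["Specimen"]), ("catalog_number", ["Specimen"]),
    ("collection_date", ["Specimen"]), ("collector", ["Specimen"]),
    ("scientific_name", ["Taxonomy"]), ("genus", ["Taxonomy"]), ("species", ["Taxonomy"]),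
    ("family", ["Taxonomy"]), ("order", ["Taxonomy"]), ("class", ["Taxonomy"]),
    ("locality", ["Locality"]), ("country", ["Locality"]), ("state", ["Locality"]),
    ("county", ["Locality"]), ("coordinates", ["Locality"]),
    ("formation", ["Locality", "Locale"]),
    ("expedition", ["Collection"]), ("project", ["Collection"]),
    ("institution", ["Collection"]), ("collection", ["Collection"]),
    ("age", ["Locale"]), ("geological_age", ["Locale"]),
    ("period", ["Locale"]), ("era", ["Locale"])]⟩

def detect_label_type_alt (fields : List (String × String)) : String :=
  -- counts = {t: 0 for t in order}
  let counts0 : PySem.Dict String Int := pvOrder.foldl (fun d t => d.insert t 0) ⟨[]⟩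
  -- {k.lower() for k in fields}; its iteration order cannot affect counts (pure tallying)
  let keyset : PySem.Set String := PySem.Set.ofList ((fields.map (·.1)).map PySem.Str.lower)
  -- for key in keyset: for t in index.get(key, []): counts[t] += 1
  let counts : PySem.Dict String Int :=
    keyset.foldl (fun (c : PySem.Dict String Int) k =>
      (pvIndex.getD k []).foldl (fun d x => d.modify x 0 (fun x => x + 1)) c) counts0
  -- best scan in canonical order, strict improvement only
  let res : String × Int :=
    pvOrder.foldl (fun bp t => if counts.getD t 0 > bp.2 then (t, counts.getD t 0) else bp)
      ("General", 0)
  res.1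

-- ===== PRECONDITION & SPEC =====
def Spec_detect_label_type (fields : List (String × String)) (out : String) : Prop := out = detect_label_type_alt fields
instance (fields : List (String × String)) (out : String) : Decidable (Spec_detect_label_type fields out) := by unfold Spec_detect_label_type; infer_instance

-- ===== CLAIM (what is proved, stated in full; the proofs are below) =====
def Claim_equal_detect_label_type : Prop := ∀ (fields : List (String × String)), Dom_detect_label_type fields → Spec_detect_label_type fields (detect_label_type fields)

-- ===== LEMMAS AND PROOFS =====\n\n-- a nested loop 'for k in K: for x in g k: body' is the flat loop over K.flatMap g
theorem foldl_foldl_eq_foldl_flatMap {α β γ : Type} (g : α → List β) (f : γ → β → γ) :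
    ∀ (K : List α) (c : γ),
      K.foldl (fun c k => (g k).foldl f c) c = (K.flatMap g).foldl f c := by
  intro K
  induction K with
  | nil => intro c; rfl
  | cons k K ih => intro c; simp [List.flatMap_cons, List.foldl_append, ih]

-- if each g k contains t exactly (if p k then 1 else 0) times, counting t in the flattened
-- votes is counting the keys satisfying p
theorem count_flatMap_eq_countP (g : String → List String) (t : String) (p : String → Bool)
    (h : ∀ k, (g k).count t = if p k then 1 else 0) :
    ∀ K : List String, ((K.flatMap g).count t) = K.countP p := by
  intro K
  induction K with
  | nil => rfl
  | cons k K ih =>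
      simp only [List.flatMap_cons, List.count_append, List.countP_cons, ih, h k]
      split_ifs <;> omega

-- vote lemmas: for each type t, (index.get(k, [])) votes once for t exactly when k is in
-- t's indicator set
theorem votes_spec (k : String) :
    (pvIndex.getD k []).count "Specimen"
      = if (["specimen_number", "catalog_number", "collection_date", "collector"] : List String).contains k then 1 else 0 := by
  simp only [pvIndex, PySem.Dict.getD, PySem.Dict.get?, List.find?]
  split_ifs <;> simp_all [List.contains_eq_mem] <;> aesop

theorem votes_tax (k : String) :
    (pvIndex.getD k []).count "Taxonomy"
      = if (["scientific_name", "genus", "species", "family", "order", "class"] : List String).contains k then 1 else 0 := by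
  simp only [pvIndex, PySem.Dict.getD, PySem.Dict.get?, List.find?]
  split_ifs <;> simp_all [List.contains_eq_mem] <;> aesop

theorem votes_loc (k : String) :
    (pvIndex.getD k []).count "Locality"
      = if (["locality", "country", "state", "county", "coordinates", "formation"] : List String).contains k then 1 else 0 := by
  simp only [pvIndex, PySem.Dict.getD, PySem.Dict.get?, List.find?]
  split_ifs <;> simp_all [List.contains_eq_mem] <;> aesop

theorem votes_coll (k : String) :
    (pvIndex.getD k []).count "Collection"
      = if (["expedition", "project", "institution", "collection"] : List String).contains k then 1 else 0 := by
  simp only [pvIndex, PySem.Dict.getD, PySem.Dict.get?, List.find?]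
  split_ifs <;> simp_all [List.contains_eq_mem] <;> aesop

theorem votes_lcl (k : String) :
    (pvIndex.getD k []).count "Locale"
      = if (["formation", "age", "geological_age", "period", "era"] : List String).contains k then 1 else 0 := by
  simp only [pvIndex, PySem.Dict.getD, PySem.Dict.get?, List.find?]
  split_ifs <;> simp_all [List.contains_eq_mem] <;> aesop


-- B's counting pass tallies, for each type t, the number of keys lying in t's indicator set
theorem counts_getD' (K : List String) (t : String) (ind : List String)
    (hv : ∀ k, (pvIndex.getD k []).count t = if ind.contains k then 1 else 0)
    (d0 : PySem.Dict String Int) (h0 : d0.getD t 0 = 0) :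
    ((K.foldl (fun (c : PySem.Dict String Int) k =>
        (pvIndex.getD k []).foldl (fun d x => PySem.Dict.modify d x 0 (fun x => x + 1)) c)
      d0).getD t 0)
      = (K.countP (fun k => ind.contains k) : Int) := by
  rw [foldl_foldl_eq_foldl_flatMap (fun k => pvIndex.getD k [])]
  rw [PySem.Dict.getD_foldl_modify_add_one]
  rw [count_flatMap_eq_countP (fun k => pvIndex.getD k []) t (fun k => ind.contains k) hv K]
  rw [h0]; ring

-- A's per-type score is the same tally
theorem score_eq_countP (K : List String) (ind : List String) (hnd : ind.Nodup) :
    PySem.Set.len (PySem.Set.inter K (PySem.Set.ofList ind))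
      = (K.countP (fun k => ind.contains k) : Int) := by
  rw [PySem.Set.ofList_eq_self_of_nodup ind hnd]
  simp [PySem.Set.len, PySem.Set.inter, PySem.Set.contains, List.countP_eq_length_filter]

theorem items_condInsert {α : Type} (n : α → String) (v : α → Int) :
    ∀ (P : List α) (d : PySem.Dict String Int),
      (∀ p ∈ P, d.contains (n p) = false) → (P.map n).Nodup →
      (P.foldl (fun d p => if v p > 0 then d.insert (n p) (v p) else d) d).items
        = d.items ++ (P.filter (fun p => decide (v p > 0))).map (fun p => (n p, v p)) := by
  intro P
  induction P with
  | nil => intro d _ _; simp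
  | cons p P ih =>
      intro d hf hnd
      rw [List.map_cons] at hnd
      have hnp : n p ∉ P.map n := (List.nodup_cons.mp hnd).1
      have h2 : (P.map n).Nodup := (List.nodup_cons.mp hnd).2
      by_cases hp : v p > 0
      · have hfresh : d.contains (n p) = false := hf p (by simp)
        have h1 : ∀ q ∈ P, (d.insert (n p) (v p)).contains (n q) = false := by
          intro q hq
          rw [PySem.Dict.contains_insert]
          have hne : n q ≠ n p := fun he => hnp (he ▸ List.mem_map_of_mem hq)
          simp [hne, hf q (List.mem_cons_of_mem _ hq)]
        rw [List.foldl_cons, if_pos hp, ih _ h1 h2,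
          PySem.Dict.items_insert_of_not_contains (h := hfresh)]
        simp [hp]
      · rw [List.foldl_cons, if_neg hp, ih _ (fun q hq => hf q (List.mem_cons_of_mem _ hq)) h2]
        simp [hp]

-- two-step law of Python's first-max fold
theorem max?_cons_cons {α κ : Type} [LinearOrder κ] (key : α → κ) (x y : α) (l : List α) :
    PySem.List.max? (x :: y :: l) key
      = PySem.List.max? ((if key x < key y then y else x) :: l) key := by
  by_cases h : key x < key y <;> simp [PySem.List.max?, h]

-- max over a dict's keys with lookup key-function = max over its items by value (names kept)
theorem max?_keys_aux (key1 : String → Int) (key2 : String × Int → Int) :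
    ∀ (l : List (String × Int)) (b : String × Int),
      (∀ p ∈ l, key1 p.1 = key2 p) → key1 b.1 = key2 b →
      PySem.List.max? (b.1 :: l.map (·.1)) key1
        = ((PySem.List.max? (b :: l) key2).map (·.1)) := by
  intro l
  induction l with
  | nil => intro b _ _; simp [PySem.List.max?]
  | cons p l ih =>
      intro b hl hb
      have hp : key1 p.1 = key2 p := hl p (by simp)
      rw [List.map_cons, max?_cons_cons, max?_cons_cons (l := l), hb, hp]
      have hsel : (if key2 b < key2 p then p.1 else b.1)
          = (if key2 b < key2 p then p else b).1 := by
        by_cases h : key2 b < key2 p <;> simp [h]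
      rw [hsel]
      exact ih _ (fun q hq => hl q (List.mem_cons_of_mem _ hq))
        (by by_cases h : key2 b < key2 p <;> simp [h, hp, hb])

theorem max?_keys_getD (D : PySem.Dict String Int) (hnd : D.keys.Nodup) :
    PySem.List.max? D.keys (fun k => D.getD k 0)
      = ((PySem.List.max? D.items (fun p => p.2)).map (·.1)) := by
  rcases hD : D.items with _ | ⟨q, l⟩
  · have hk : D.keys = [] := by simp [PySem.Dict.keys, hD]
    simp [hk, PySem.List.max?]
  · have hmem : ∀ p ∈ D.items, (fun k => D.getD k 0) p.1 = (fun p : String × Int => p.2) p := by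
      intro p hp
      cases p with
      | mk a b => exact PySem.Dict.getD_of_mem_items D (by exact hp) hnd 0
    have hk : D.keys = q.1 :: l.map (·.1) := by simp [PySem.Dict.keys, hD]
    rw [hk]
    exact max?_keys_aux _ _ l q
      (fun p hp => hmem p (by rw [hD]; exact List.mem_cons_of_mem _ hp))
      (hmem q (by rw [hD]; exact List.mem_cons_self))

theorem selAux : ∀ (L : List (String × Int)) (b : String × Int), 0 < b.2 →
    PySem.List.max? (b :: L.filter (fun p => decide (p.2 > 0))) (fun p => p.2)
      = some (L.foldl (fun bp p => if p.2 > bp.2 then p else bp) b) := by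
  intro L
  induction L with
  | nil => intro b _; simp [PySem.List.max?]
  | cons p L ih =>
      intro b hb
      by_cases hp : p.2 > 0
      · rw [List.filter_cons, if_pos (by simpa using hp), max?_cons_cons, List.foldl_cons]
        by_cases hlt : p.2 > b.2
        · rw [if_pos (show (fun p : String × Int => p.2) b < (fun p : String × Int => p.2) p by simpa using hlt)]
          exact ih p hp
        · rw [if_neg (show ¬ (fun p : String × Int => p.2) b < (fun p : String × Int => p.2) p by simpa using hlt)]
          exact ih b hb
      · rw [List.filter_cons, if_neg (by simpa using hp), List.foldl_cons,
          if_neg (show ¬ p.2 > b.2 by omega)]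
        exact ih b hb

theorem selMain (L : List (String × Int)) :
    (((PySem.List.max? (L.filter (fun p => decide (p.2 > 0))) (fun p => p.2)).map (·.1)).getD "General")
      = (L.foldl (fun bp p => if p.2 > bp.2 then p else bp) ("General", 0)).1 := by
  induction L with
  | nil => rfl
  | cons p L ih =>
      by_cases hp : p.2 > 0
      · rw [List.filter_cons, if_pos (by simpa using hp), List.foldl_cons,
          if_pos (show p.2 > ("General", (0:Int)).2 by simpa using hp), selAux L p hp]
        simp
      · rw [List.filter_cons, if_neg (by simpa using hp), List.foldl_cons,
          if_neg (show ¬ p.2 > ("General", (0:Int)).2 by simpa using hp)]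
        exact ih


theorem detect_label_type_spec : Claim_equal_detect_label_type := by
  intro fields _
  unfold Spec_detect_label_type detect_label_type detect_label_type_alt
  simp only [List.foldl_cons, List.foldl_nil, pvOrder]
  set K : List String := PySem.Set.ofList ((fields.map (·.1)).map PySem.Str.lower) with hK
  rw [score_eq_countP K ["specimen_number", "catalog_number", "collection_date", "collector"] (by decide),
      score_eq_countP K ["scientific_name", "genus", "species", "family", "order", "class"] (by decide),
      score_eq_countP K ["locality", "country", "state", "county", "coordinates", "formation"] (by decide),
      score_eq_countP K ["expedition", "project", "institution", "collection"] (by decide),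
      score_eq_countP K ["formation", "age", "geological_age", "period", "era"] (by decide)]
  rw [counts_getD' K "Specimen" ["specimen_number", "catalog_number", "collection_date", "collector"] votes_spec,
      counts_getD' K "Taxonomy" ["scientific_name", "genus", "species", "family", "order", "class"] votes_tax,
      counts_getD' K "Locality" ["locality", "country", "state", "county", "coordinates", "formation"] votes_loc,
      counts_getD' K "Collection" ["expedition", "project", "institution", "collection"] votes_coll,
      counts_getD' K "Locale" ["formation", "age", "geological_age", "period", "era"] votes_lcl]
  all_goals try decide
  generalize (↑(List.countP (fun k => ["specimen_number", "catalog_number", "collection_date", "collector"].contains k) K) : Int) = v1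
  generalize (↑(List.countP (fun k => ["scientific_name", "genus", "species", "family", "order", "class"].contains k) K) : Int) = v2
  generalize (↑(List.countP (fun k => ["locality", "country", "state", "county", "coordinates", "formation"].contains k) K) : Int) = v3
  generalize (↑(List.countP (fun k => ["expedition", "project", "institution", "collection"].contains k) K) : Int) = v4
  generalize (↑(List.countP (fun k => ["formation", "age", "geological_age", "period", "era"].contains k) K) : Int) = v5
  have hnodupP : (([("Specimen", v1), ("Taxonomy", v2), ("Locality", v3), ("Collection", v4), ("Locale", v5)] : List (String × Int)).map (·.1)).Nodup := by
    simp
  have hitems := items_condInsert (·.1) (·.2)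
      [("Specimen", v1), ("Taxonomy", v2), ("Locality", v3), ("Collection", v4), ("Locale", v5)]
      ⟨[]⟩ (fun p hp => rfl) hnodupP
  simp only [List.foldl_cons, List.foldl_nil, List.nil_append, Prod.mk.eta, List.map_id'] at hitems
  rw [max?_keys_getD]
  case hnd =>
    rw [PySem.Dict.keys, hitems]
    exact hnodupP.sublist
      ((List.filter_sublist (p := fun p : String × Int => decide (p.2 > 0))
        (l := [("Specimen", v1), ("Taxonomy", v2), ("Locality", v3), ("Collection", v4), ("Locale", v5)])).map
        (fun p : String × Int => p.1))
  rw [hitems]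
  simp only [PySem.Dict.size, hitems]
  by_cases hz : (([("Specimen", v1), ("Taxonomy", v2), ("Locality", v3), ("Collection", v4), ("Locale", v5)] : List (String × Int)).filter (fun p => decide (p.2 > 0))) = []
  · rw [hz]
    have hsel := selMain [("Specimen", v1), ("Taxonomy", v2), ("Locality", v3), ("Collection", v4), ("Locale", v5)]
    rw [hz] at hsel
    simp only [PySem.List.max?, List.foldl_nil, Option.map_none, Option.getD_none,
      List.foldl_cons] at hsel
    simpa using hsel
  · rw [if_pos (by simpa [List.length_eq_zero_iff] using hz)]
    have hsel := selMain [("Specimen", v1), ("Taxonomy", v2), ("Locality", v3), ("Collection", v4), ("Locale", v5)]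
    simp only [List.foldl_cons, List.foldl_nil] at hsel
    exact hsel
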